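-- pv_equiv track=rewrite | github.com/copperdogma/doc-web | modules/portionize/detect_gameplay_numbers_v1/main.py | expand_candidates
-- ===== SOURCE A (Python) =====
-- from itertools import product
-- from typing import Dict, List
--
-- CHAR_OPTIONS = {
--     # digit-like letters
--     "o": ["0"], "O": ["0"],
--     "l": ["1", "8"], "I": ["1"], "i": ["1"],
--     "b": ["6", "8"], "B": ["8"],
--     "g": ["9"], "q": ["9"],
--     "s": ["5", "8"], "S": ["5", "8"],
--     "z": ["2"],
--     # punctuation/noise that should drop out
--     ":": ["", "1", "2"], ".": [""], "'": [""], "`": [""], '"': [""],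
--     "-": [""], "–": [""], "—": [""],
--     "%": ["", "2"],  # rare OCR swap for a 2
-- }
--
-- def expand_candidates(token: str, max_combos: int = 32) -> List[int]:
--     """
--     Generate plausible numeric ids from a short token containing digits/punct/OCR-misread letters.
--     Returns unique integers within plausible length (1-3 digits).
--     """
--     options: List[List[str]] = []
--     for ch in token:
--         if ch.isdigit():
--             options.append([ch])
--         elif ch in CHAR_OPTIONS:
--             options.append(CHAR_OPTIONS[ch])
--         elif ch.isspace():
--             continue
--         else:
--             return []
--         # quick guard against explosion
--         combo_est = 1
--         for opt in options:
--             combo_est *= len(opt)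
--         if combo_est > max_combos:
--             return []
--
--     combos = set()
--     for parts in product(*options) if options else []:
--         num_str = "".join(parts)
--         if not num_str or len(num_str) > 3:
--             continue
--         if num_str.startswith("0"):
--             continue
--         combos.add(int(num_str))
--     return sorted(combos)
-- ===== SOURCE B (Python) =====
-- # B: incremental cartesian-product build — a running list of partial strings replaces
-- # itertools.product and the recomputed combo_est guard (accumulator length is the estimate).
-- CHAR_OPTIONS = {
--     "o": ["0"], "O": ["0"],
--     "l": ["1", "8"], "I": ["1"], "i": ["1"],
--     "b": ["6", "8"], "B": ["8"],
--     "g": ["9"], "q": ["9"],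
--     "s": ["5", "8"], "S": ["5", "8"],
--     "z": ["2"],
--     ":": ["", "1", "2"], ".": [""], "'": [""], "`": [""], '"': [""],
--     "-": [""], "–": [""], "—": [""],
--     "%": ["", "2"],
-- }
--
-- def expand_candidates(token: str, max_combos: int = 32):
--     partials = [""]
--     for ch in token:
--         if ch.isdigit():
--             opts = [ch]
--         elif ch in CHAR_OPTIONS:
--             opts = CHAR_OPTIONS[ch]
--         elif ch.isspace():
--             continue
--         else:
--             return []
--         partials = [p + o for p in partials for o in opts]
--         if len(partials) > max_combos:
--             return []
--     return sorted({int(p) for p in partials if p and len(p) <= 3 and not p.startswith("0")})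
-- ===== Notes on version B (the rewrite author's own statement) =====
-- stated objective: alternative
-- what changed: Replaces the per-char options list + itertools.product final expansion with an incremental running list of partial strings, the explosion guard becoming the accumulator's length instead of a recomputed product of option-list lengths.
import Mathlib
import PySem

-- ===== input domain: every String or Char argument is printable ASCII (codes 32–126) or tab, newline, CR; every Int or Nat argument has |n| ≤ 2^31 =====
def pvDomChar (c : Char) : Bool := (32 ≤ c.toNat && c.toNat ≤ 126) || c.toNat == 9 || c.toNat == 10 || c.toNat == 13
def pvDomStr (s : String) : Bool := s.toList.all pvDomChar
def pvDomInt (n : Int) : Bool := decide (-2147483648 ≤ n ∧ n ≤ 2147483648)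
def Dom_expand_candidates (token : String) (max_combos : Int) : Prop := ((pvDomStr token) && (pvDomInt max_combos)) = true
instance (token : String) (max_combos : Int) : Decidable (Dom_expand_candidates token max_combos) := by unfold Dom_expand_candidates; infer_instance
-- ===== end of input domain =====

-- B replaces A's options-list + itertools.product expansion by an incremental running list of
-- partial strings whose length is the explosion guard (objective: alternative decomposition).
-- Python strings are carried as List Char; "".join(parts) is List.flatten (exact concatenation).

-- ===== PORT A =====
-- module-level CHAR_OPTIONS (shared data of both Pythons); values are lists of strings as List Char
def pvCharOptions : PySem.Dict Char (List (List Char)) :=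
  PySem.Dict.ofList
  [('o', [['0']]), ('O', [['0']]),
   ('l', [['1'], ['8']]), ('I', [['1']]), ('i', [['1']]),
   ('b', [['6'], ['8']]), ('B', [['8']]),
   ('g', [['9']]), ('q', [['9']]),
   ('s', [['5'], ['8']]), ('S', [['5'], ['8']]),
   ('z', [['2']]),
   (':', [[], ['1'], ['2']]), ('.', [[]]), ('\'', [[]]), ('`', [[]]), ('"', [[]]),
   ('-', [[]]), ('–', [[]]), ('—', [[]]),
   ('%', [[], ['2']])]

-- combo_est = 1; for opt in options: combo_est *= len(opt)
def pvComboEst (options : List (List (List Char))) : Int :=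
  options.foldl (fun p o => p * (o.length : Int)) 1

-- A's for-loop over the token building `options`, with both early returns (none = return [])
def pvOptionsLoop : List Char → List (List (List Char)) → Int → Option (List (List (List Char)))
  | [], options, _ => some options
  | ch :: rest, options, m =>
    if PySem.Chars.isdigit ch then
      let options' := options ++ [[[ch]]]
      if pvComboEst options' > m then none else pvOptionsLoop rest options' m
    else
      match PySem.Dict.get? pvCharOptions ch with
      | some opts =>
        let options' := options ++ [opts]
        if pvComboEst options' > m then none else pvOptionsLoop rest options' m
      | none =>
        if PySem.Chars.isspace ch then pvOptionsLoop rest options m else none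

-- itertools.product(*options), in CPython's order (rightmost factor varies fastest)
def pvProduct : List (List (List Char)) → List (List (List Char))
  | [] => [[]]
  | o :: rest => o.flatMap (fun x => (pvProduct rest).map (fun t => x :: t))

-- body of A's second loop: join, the two `continue` filters, combos.add(int(num_str))
def pvCollectA (s : PySem.Set Int) (parts : List (List Char)) : PySem.Set Int :=
  let num := parts.flatten
  if num = [] ∨ num.length > 3 then s
  else if PySem.Chars.startswith num ['0'] then s
  else PySem.Set.add s ((PySem.Int.ofChars? num).getD 0)  -- int(num): num is nonempty digits, never ValueError

def expand_candidates (token : String) (max_combos : Int) : List Int :=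
  match pvOptionsLoop token.toList [] max_combos with
  | none => []
  | some options =>
    let prods := if options = [] then [] else pvProduct options  -- `product(*options) if options else []`
    let combos := prods.foldl pvCollectA PySem.Set.empty
    PySem.List.sorted combos (fun x => x) false

-- ===== PORT B =====
-- B's loop: partials is the running list of all partial strings; guard = its length
def pvPartialsLoop : List Char → List (List Char) → Int → Option (List (List Char))
  | [], partials, _ => some partials
  | ch :: rest, partials, m =>
    if PySem.Chars.isdigit ch then
      let partials' := partials.flatMap (fun p => [[ch]].map (fun o => p ++ o))
      if (partials'.length : Int) > m then none else pvPartialsLoop rest partials' m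
    else
      match PySem.Dict.get? pvCharOptions ch with
      | some opts =>
        let partials' := partials.flatMap (fun p => opts.map (fun o => p ++ o))
        if (partials'.length : Int) > m then none else pvPartialsLoop rest partials' m
      | none =>
        if PySem.Chars.isspace ch then pvPartialsLoop rest partials m else none

-- B's final set comprehension body
def pvCollectB (s : PySem.Set Int) (p : List Char) : PySem.Set Int :=
  if p ≠ [] ∧ p.length ≤ 3 ∧ PySem.Chars.startswith p ['0'] = false then
    PySem.Set.add s ((PySem.Int.ofChars? p).getD 0)
  else s

def expand_candidates_alt (token : String) (max_combos : Int) : List Int :=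
  match pvPartialsLoop token.toList [[]] max_combos with
  | none => []
  | some partials =>
    PySem.List.sorted (partials.foldl pvCollectB PySem.Set.empty) (fun x => x) false

-- ===== PRECONDITION & SPEC =====
def Spec_expand_candidates (token : String) (max_combos : Int) (out : List Int) : Prop := out = expand_candidates_alt token max_combos
instance (token : String) (max_combos : Int) (out : List Int) : Decidable (Spec_expand_candidates token max_combos out) := by unfold Spec_expand_candidates; infer_instance

-- ===== CLAIM (what is proved, stated in full; the proofs are below) =====
def Claim_equal_expand_candidates : Prop := ∀ (token : String) (max_combos : Int), Dom_expand_candidates token max_combos → Spec_expand_candidates token max_combos (expand_candidates token max_combos)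

-- ===== LEMMAS AND PROOFS =====

lemma pvCollect_eq (s : PySem.Set Int) (parts : List (List Char)) :
    pvCollectA s parts = pvCollectB s parts.flatten := by
  simp only [pvCollectA, pvCollectB]
  by_cases e : parts.flatten = []
  · simp [e]
  · simp only [List.length_flatten] at *
    by_cases l : (parts.map List.length).sum ≤ 3
    · cases hsw : PySem.Chars.startswith parts.flatten ['0'] <;> simp [e, l]
    · simp [e, l, Nat.lt_of_not_le l]

lemma pvProduct_length (os : List (List (List Char))) (p : Int) :
    os.foldl (fun p o => p * (o.length : Int)) p = p * ((pvProduct os).length : Int) := by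
  induction os generalizing p with
  | nil => simp [pvProduct]
  | cons o os ih =>
    simp only [List.foldl_cons, pvProduct, ih]
    have hlen : ((o.flatMap fun x => (pvProduct os).map (fun t => x :: t)).length)
        = o.length * (pvProduct os).length := by
      simp [List.length_flatMap, List.map_const', List.sum_replicate]
    rw [hlen]; push_cast; ring

lemma pvProduct_append (os : List (List (List Char))) (o : List (List Char)) :
    (pvProduct (os ++ [o])).map List.flatten
      = ((pvProduct os).map List.flatten).flatMap (fun p => o.map (fun x => p ++ x)) := by
  induction os with
  | nil =>
    simp only [pvProduct, List.nil_append]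
    induction o with
    | nil => simp
    | cons a o iho => simp_all
  | cons o' os ih =>
    simp only [List.cons_append, pvProduct, List.map_flatMap, List.map_map]
    rw [List.flatMap_assoc]
    refine List.flatMap_congr ?_
    intro x _
    have : (List.map (List.flatten ∘ fun t => x :: t) (pvProduct (os ++ [o])))
        = List.map (fun p => x ++ p) ((pvProduct (os ++ [o])).map List.flatten) := by
      simp [Function.comp_def]
    rw [this, ih]
    simp [List.map_flatMap, List.flatMap_map, Function.comp_def, List.map_map, List.append_assoc]

lemma pvComboEst_len (os : List (List (List Char))) :
    pvComboEst os = ((pvProduct os).length : Int) := by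
  simpa [pvComboEst] using pvProduct_length os 1

lemma pvLoop_corr : ∀ (cs : List Char) (os : List (List (List Char))) (m : Int),
    pvPartialsLoop cs ((pvProduct os).map List.flatten) m
      = Option.map (fun os' => (pvProduct os').map List.flatten) (pvOptionsLoop cs os m) := by
  intro cs
  induction cs with
  | nil => intro os m; rfl
  | cons ch cs ih =>
    intro os m
    simp only [pvPartialsLoop, pvOptionsLoop]
    by_cases hd : PySem.Chars.isdigit ch = true
    · simp only [hd, if_true]
      rw [← pvProduct_append os [[ch]]]
      have hg : ((List.map List.flatten (pvProduct (os ++ [[[ch]]]))).length : Int)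
          = pvComboEst (os ++ [[[ch]]]) := by rw [pvComboEst_len]; simp
      rw [hg]
      by_cases hguard : pvComboEst (os ++ [[[ch]]]) > m
      · simp [hguard]
      · simp [hguard, ih]
    · simp only [hd, if_false, Bool.false_eq_true]
      cases hget : PySem.Dict.get? pvCharOptions ch with
      | some opts =>
        dsimp only
        rw [← pvProduct_append os opts]
        have hg : ((List.map List.flatten (pvProduct (os ++ [opts]))).length : Int)
            = pvComboEst (os ++ [opts]) := by rw [pvComboEst_len]; simp
        rw [hg]
        by_cases hguard : pvComboEst (os ++ [opts]) > m
        · simp [hguard]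
        · simp [hguard, ih]
      | none =>
        by_cases hs : PySem.Chars.isspace ch = true
        · simp [hs, ih]
        · simp [hs]

-- ===== VERDICT (by name: the statement is the Claim_ definition above) =====
theorem expand_candidates_spec : Claim_equal_expand_candidates := by
  intro token m _
  unfold Spec_expand_candidates expand_candidates expand_candidates_alt
  have h0 : ([[]] : List (List Char)) = (pvProduct []).map List.flatten := by simp [pvProduct]
  rw [h0, pvLoop_corr]
  cases hl : pvOptionsLoop token.toList [] m with
  | none => simp
  | some options =>
    simp only [Option.map_some]
    by_cases ho : options = []
    · subst ho; simp [pvProduct, pvCollectB, PySem.Set.empty]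
    · simp only [if_neg ho]
      rw [List.foldl_map]
      have hfun : (fun (s : PySem.Set Int) (t : List (List Char)) => pvCollectB s t.flatten)
          = pvCollectA := by
        funext s t; exact (pvCollect_eq s t).symm
      rw [hfun]
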